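-- pv_equiv track=rewrite | github.com/abdxxw/DNA-sequences | src/adn.py | align_lettre_mot
-- ===== SOURCE A (Python) =====
-- def sub(x,y):	#cout de substitution
--     if x==y:
--         return 0
--     if ((x == 'A' and y == 'T') or (x == 'T' and y == 'A')) or ((x == 'G' and y == 'C') or (x == 'C' and y == 'G')): #partie concordante
--         return 3
--     return 4
--
-- def  mot_gaps(k):
-- 	#on cree une liste vide et on lui ajoute k gaps
-- 	out=[]
-- 	for x in range(1,k+1):
-- 		out.append('-')
-- 	return out
--
-- def align_lettre_mot(x,y):
-- 	#cree un indice pour que a la fin de la boucle on a x=une lettre t tq sub(x,t)=3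
-- 	indice=-1
-- 	m=len(y)
-- 	# on parcour tout le mot y et pour chaque lettre t de ce dernier on verfie 3 cas:
-- 	for i in range(0,m):
-- 		# si x=t on retourne directement i*gapr+x+m-i-1 gaps
-- 		if y[i]==x[0] :
-- 			return(mot_gaps(i)+x+mot_gaps(m-i-1),y)
-- 		else:
-- 			# si non on essye de trouver une lettre tq
-- 			if (sub(x[0],y[i]) == 3):
-- 				if indice!=-1:
-- 					indice=indice
-- 				else:
-- 					indice=i
-- 	if(indice!=-1):
-- 		return(mot_gaps(indice)+x+mot_gaps(m-indice-1),y)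
-- 	return(x+mot_gaps(len(y)-1),y)
-- ===== SOURCE B (Python) =====
-- def align_lettre_mot(x, y):
--     # two separate passes: first exact-match position, then concordant position, then build
--     m = len(y)
--     try:
--         pos = next(i for i, c in enumerate(y) if c == x[0])
--     except StopIteration:
--         pairs = {('A', 'T'), ('T', 'A'), ('G', 'C'), ('C', 'G')}
--         pos = next((i for i, c in enumerate(y) if (x[0], c) in pairs), 0)
--     return (['-'] * pos + x + ['-'] * (m - pos - 1), y)
-- ===== Notes on version B (the rewrite author's own statement) =====
-- stated objective: simpler
-- what changed: A's single fused scan (early return on exact match, a mutated 'indice' for the concordant fallback) is replaced by two separate searches - first exact-match index, then first concordant index, defaulting to 0 - after which the result is built once from the position.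
import Mathlib
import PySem

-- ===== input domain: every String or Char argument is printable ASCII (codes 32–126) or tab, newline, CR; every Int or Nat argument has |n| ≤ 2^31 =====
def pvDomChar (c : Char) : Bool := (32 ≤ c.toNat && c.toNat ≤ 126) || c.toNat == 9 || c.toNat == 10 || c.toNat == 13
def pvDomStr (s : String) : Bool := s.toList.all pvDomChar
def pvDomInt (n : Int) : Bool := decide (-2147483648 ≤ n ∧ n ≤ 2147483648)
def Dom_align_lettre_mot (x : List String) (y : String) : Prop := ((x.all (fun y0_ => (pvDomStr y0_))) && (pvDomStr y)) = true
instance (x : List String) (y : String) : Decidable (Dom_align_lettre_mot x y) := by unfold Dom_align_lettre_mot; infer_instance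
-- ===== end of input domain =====

-- B computes the insertion position in two separate passes (exact match, then concordant
-- letter) and builds the result once, instead of A's single fused scan; objective: simpler.


-- ===== PORT A =====
def sub (a b : String) : Int :=
  if a == b then 0
  else if ((a == "A" && b == "T") || (a == "T" && b == "A")) ||
          ((a == "G" && b == "C") || (a == "C" && b == "G")) then 3
  else 4

def mot_gaps (k : Int) : List String :=
  (PySem.List.pyRange 1 (k + 1) 1).foldl (fun out _ => out ++ ["-"]) []

-- the for-loop of A: chars of y with running index i, early return on exact match,
-- `indice` remembers the first concordant position
def alignLoopA (x : List String) (x0 : String) (y : String) (m : Int) :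
    List Char → Int → Int → List String × String
  | [], _, indice =>
      if indice != -1 then (mot_gaps indice ++ x ++ mot_gaps (m - indice - 1), y)
      else (x ++ mot_gaps (m - 1), y)
  | c :: rest, i, indice =>
      if String.singleton c == x0 then (mot_gaps i ++ x ++ mot_gaps (m - i - 1), y)
      else if sub x0 (String.singleton c) == 3 then
        alignLoopA x x0 y m rest (i + 1) (if indice != -1 then indice else i)
      else alignLoopA x x0 y m rest (i + 1) indice

def align_lettre_mot (x : List String) (y : String) : List String × String :=
  -- x[0]: Pre_ excludes the IndexError case (x = [] with nonempty y)
  alignLoopA x ((PySem.List.pyGet? x 0).getD "") y (PySem.Str.len y) y.toList 0 (-1)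

-- ===== PORT B =====
-- first index of y whose letter equals x[0]
def firstExact (x0 : String) : List Char → Int → Option Int
  | [], _ => none
  | c :: rest, i => if String.singleton c == x0 then some i else firstExact x0 rest (i + 1)

def concPairs : List (String × Char) := [("A", 'T'), ("T", 'A'), ("G", 'C'), ("C", 'G')]

-- first index of y concordant with x[0]
def firstConc (x0 : String) : List Char → Int → Option Int
  | [], _ => none
  | c :: rest, i => if concPairs.contains (x0, c) then some i else firstConc x0 rest (i + 1)

def align_lettre_mot_alt (x : List String) (y : String) : List String × String :=
  let m : Int := PySem.Str.len y
  let x0 : String := (PySem.List.pyGet? x 0).getD ""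
  let pos : Int :=
    match firstExact x0 y.toList 0 with
    | some i => i
    | none => (firstConc x0 y.toList 0).getD 0
  (PySem.List.pyRepeat ["-"] pos ++ x ++ PySem.List.pyRepeat ["-"] (m - pos - 1), y)

-- ===== PRECONDITION & SPEC =====
-- Pre_ excludes x = [] with nonempty y: there A raises IndexError on x[0] (and B raises too).
def Pre_align_lettre_mot (x : List String) (y : String) : Prop := x ≠ [] ∨ y = ""
instance (x : List String) (y : String) : Decidable (Pre_align_lettre_mot x y) := by
  unfold Pre_align_lettre_mot; infer_instance

def pvWitness_align_lettre_mot : List String × String := (["A"], "GT")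

def Spec_align_lettre_mot (x : List String) (y : String) (out : List String × String) : Prop := out = align_lettre_mot_alt x y
instance (x : List String) (y : String) (out : List String × String) : Decidable (Spec_align_lettre_mot x y out) := by unfold Spec_align_lettre_mot; infer_instance

-- ===== CLAIM (what is proved, stated in full; the proofs are below) =====
def Claim_equal_align_lettre_mot : Prop := ∀ (x : List String) (y : String), Dom_align_lettre_mot x y → Pre_align_lettre_mot x y → Spec_align_lettre_mot x y (align_lettre_mot x y)

-- ===== LEMMAS AND PROOFS =====

lemma mot_gaps_eq (k : Int) : mot_gaps k = List.replicate k.toNat "-" := by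
  unfold mot_gaps
  rw [PySem.List.pyRange_one, PySem.List.foldl_append_singleton_eq_map]
  simp [Function.comp_def, List.map_const']

lemma singleton_beq (c d : Char) : (String.singleton c == String.singleton d) = (c == d) := by
  by_cases h : c = d
  · subst h; simp
  · have h2 : ¬ String.singleton c = String.singleton d := by
      intro h'; exact h (by simpa using congrArg String.toList h')
    simp [h, h2]

lemma seA (c : Char) : (String.singleton c = "A") ↔ c = 'A' := by simpa using singleton_beq c 'A'
lemma seT (c : Char) : (String.singleton c = "T") ↔ c = 'T' := by simpa using singleton_beq c 'T'
lemma seG (c : Char) : (String.singleton c = "G") ↔ c = 'G' := by simpa using singleton_beq c 'G'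
lemma seC (c : Char) : (String.singleton c = "C") ↔ c = 'C' := by simpa using singleton_beq c 'C'

lemma sub_three (x0 : String) (c : Char) :
    (sub x0 (String.singleton c) == 3) = concPairs.contains (x0, c) := by
  unfold sub concPairs
  by_cases heq : x0 = String.singleton c
  · subst heq
    simp only [beq_self_eq_true, if_true, List.contains_cons, List.contains_nil]
    by_cases h1 : c = 'A' <;> by_cases h2 : c = 'T' <;> by_cases h3 : c = 'G' <;>
      by_cases h4 : c = 'C' <;> simp_all [seA, seT, seG, seC]
  · rw [if_neg (by simpa using heq)]
    simp only [List.contains_cons, List.contains_nil]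
    by_cases h1 : x0 = "A" <;> by_cases h2 : x0 = "T" <;> by_cases h3 : x0 = "G" <;>
      by_cases h4 : x0 = "C" <;> by_cases h5 : c = 'A' <;> by_cases h6 : c = 'T' <;>
      by_cases h7 : c = 'G' <;> by_cases h8 : c = 'C' <;> simp_all [seA, seT, seG, seC]

lemma loopA_eq (x : List String) (x0 : String) (y : String) (m : Int) (cs : List Char) :
    ∀ (i indice : Int), 0 ≤ i →
    indice = -1 ∨ 0 ≤ indice →
    alignLoopA x x0 y m cs i indice =
      match firstExact x0 cs i with
      | some j => (mot_gaps j ++ x ++ mot_gaps (m - j - 1), y)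
      | none =>
          if indice = -1 then
            match firstConc x0 cs i with
            | some j => (mot_gaps j ++ x ++ mot_gaps (m - j - 1), y)
            | none => (x ++ mot_gaps (m - 1), y)
          else (mot_gaps indice ++ x ++ mot_gaps (m - indice - 1), y) := by
  induction cs with
  | nil =>
      intro i indice _ _
      simp only [alignLoopA, firstExact, firstConc]
      by_cases h : indice = -1 <;> simp [h]
  | cons c rest ih =>
      intro i indice hi hind
      simp only [alignLoopA, firstExact, firstConc]
      by_cases hex : String.singleton c == x0
      · simp [hex]
      · simp only [hex, if_false, Bool.false_eq_true]
        rw [sub_three]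
        by_cases hcp : concPairs.contains (x0, c)
        · simp only [hcp, if_true]
          by_cases h : indice = -1
          · subst h
            simp only [show ((-1 : Int) != -1) = false from rfl, if_false, Bool.false_eq_true]
            rw [ih (i + 1) i (by omega) (Or.inr hi)]
            cases hfe : firstExact x0 rest (i + 1) with
            | some j => simp
            | none => simp [show ¬ i = -1 by omega]
          · have hne : (indice != -1) = true := by simpa using h
            simp only [hne, if_true]
            rw [ih (i + 1) indice (by omega) hind]
            cases hfe : firstExact x0 rest (i + 1) with
            | some j => simp
            | none => simp [h]
        · simp only [hcp, if_false, Bool.false_eq_true]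
          exact ih (i + 1) indice (by omega) hind

-- ===== VERDICT (by name: the statement is the Claim_ definition above) =====
theorem align_lettre_mot_spec : Claim_equal_align_lettre_mot := by
  intro x y _ _
  unfold Spec_align_lettre_mot align_lettre_mot align_lettre_mot_alt
  rw [loopA_eq _ _ _ _ _ 0 (-1) le_rfl (Or.inl rfl)]
  cases hfe : firstExact ((PySem.List.pyGet? x 0).getD "") y.toList 0 with
  | some j => simp [hfe, mot_gaps_eq]
  | none =>
      cases hfc : firstConc ((PySem.List.pyGet? x 0).getD "") y.toList 0 with
      | some j => simp [hfe, hfc, mot_gaps_eq]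
      | none => simp [hfe, hfc, mot_gaps_eq]
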